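-- pv_equiv track=rewrite | github.com/MC-and-his-Agents/Syvert | scripts/pr_guardian.py | parse_bullet_kv_section
-- ===== SOURCE A (Python) =====
-- def parse_bullet_kv_section(section: str) -> dict[str, str]:
--     payload: dict[str, str] = {}
--     current_key: str | None = None
--     for raw_line in section.splitlines():
--         line = raw_line.rstrip()
--         stripped = line.strip()
--         if stripped.startswith("- "):
--             entry = stripped[2:]
--             key_part, _, value_part = entry.partition(":")
--             if not _:
--                 key_part, _, value_part = entry.partition("：")
--             normalized_key = key_part.split("（", 1)[0].split("(", 1)[0].strip()
--             current_key = normalized_key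
--             payload[current_key] = value_part.strip()
--             continue
--         if current_key and stripped and raw_line[:1].isspace():
--             payload[current_key] = "\n".join(filter(None, [payload[current_key], stripped])).strip()
--     return payload
-- ===== SOURCE B (Python) =====
-- def parse_bullet_kv_section(section: str) -> dict[str, str]:
--     # Pass 1: collect records (normalized key, list of value pieces); continuations
--     # attach to the active (last) record.  Pass 2: join each record's non-empty
--     # pieces once and write them into the dict in order (last duplicate key wins).
--     records = []
--     for raw_line in section.splitlines():
--         stripped = raw_line.strip()
--         if stripped.startswith("- "):
--             entry = stripped[2:]
--             key_part, sep, value_part = entry.partition(":")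
--             if not sep:
--                 key_part, sep, value_part = entry.partition("：")
--             key = key_part.split("（", 1)[0].split("(", 1)[0].strip()
--             records.append((key, [value_part.strip()]))
--         elif records and records[-1][0] and stripped and raw_line[:1].isspace():
--             records[-1][1].append(stripped)
--     payload = {}
--     for key, pieces in records:
--         payload[key] = "\n".join(p for p in pieces if p)
--     return payload
-- ===== Notes on version B (the rewrite author's own statement) =====
-- stated objective: alternative
-- what changed: Replaces the dict-and-current-key state machine that re-joins and re-strips the accumulated value on every continuation line with a two-pass design: pass one groups lines into (key, value-pieces) records, pass two joins each record's non-empty pieces exactly once into the dict.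
import Mathlib
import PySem

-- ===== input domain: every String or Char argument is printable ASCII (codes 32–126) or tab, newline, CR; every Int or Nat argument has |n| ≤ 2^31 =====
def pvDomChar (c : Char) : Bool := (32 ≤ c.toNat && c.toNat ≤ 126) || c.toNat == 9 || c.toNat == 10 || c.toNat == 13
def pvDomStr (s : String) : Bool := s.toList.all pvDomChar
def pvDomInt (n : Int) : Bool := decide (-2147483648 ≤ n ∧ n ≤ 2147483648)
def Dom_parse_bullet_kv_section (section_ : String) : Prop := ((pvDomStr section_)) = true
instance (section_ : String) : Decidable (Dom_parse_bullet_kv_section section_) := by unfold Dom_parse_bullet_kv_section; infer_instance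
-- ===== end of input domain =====

-- B replaces A's dict-plus-current-key state machine (which re-joins and re-strips the value
-- on every continuation line) by a two-pass design: collect (key, pieces) records, then join
-- each record's non-empty pieces once (objective: alternative decomposition, same cost class).

-- ===== PORT A =====
-- shared by both ports (the same source lines appear verbatim in both Pythons):
-- entry.partition(sep)  (Python: (before, sep, after) at the first occurrence, else (entry, "", ""))
def pvPartition (s sep : String) : String × String × String :=
  match PySem.Str.splitMax? s sep 1 with
  | some [a, b] => (a, sep, b)
  | _ => (s, "", "")

-- s.split(sep, 1)[0]  (text before the first occurrence of sep, or s itself)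
def pvSplitHead (s sep : String) : String :=
  match PySem.Str.splitMax? s sep 1 with
  | some (a :: _) => a
  | _ => s

-- key_part, _, value_part = entry.partition(":") / entry.partition("："); key normalization
def pvEntryKV (entry : String) : String × String :=
  let p1 := pvPartition entry ":"
  let p := if p1.2.1 = "" then pvPartition entry "：" else p1
  let normalized_key := PySem.Str.strip (pvSplitHead (pvSplitHead p.1 "（") "(")
  (normalized_key, p.2.2)

-- one iteration of A's loop; state = (payload, current_key).
-- payload[current_key] is ported as getD "" : the key is always present when the guard holds
-- (it was inserted when current_key was set), so this is exact on reachable states.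
def pvA_step (st : PySem.Dict String String × Option String) (raw_line : String) :
    PySem.Dict String String × Option String :=
  let line := PySem.Str.rstrip raw_line
  let stripped := PySem.Str.strip line
  if PySem.Str.startswith stripped "- " then
    let entry := PySem.Str.slice stripped (some 2) none
    let kv := pvEntryKV entry
    (st.1.insert kv.1 (PySem.Str.strip kv.2), some kv.1)
  else
    match st.2 with
    | some current_key =>
      if current_key ≠ "" ∧ stripped ≠ "" ∧
          PySem.Str.strIsspace (PySem.Str.slice raw_line none (some 1)) = true then
        (st.1.insert current_key
          (PySem.Str.strip (PySem.Str.join "\n"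
            (([st.1.getD current_key "", stripped]).filter (fun p => p ≠ "")))), st.2)
      else st
    | none => st

def parse_bullet_kv_section (section_ : String) : List (String × String) :=
  ((PySem.Str.splitlines section_).foldl pvA_step (PySem.Dict.empty, none)).1.items

-- ===== PORT B =====
-- pass 1: one iteration; records = list of (key, pieces), the last record is the active one
def pvB_step (recs : List (String × List String)) (raw_line : String) :
    List (String × List String) :=
  let stripped := PySem.Str.strip raw_line
  if PySem.Str.startswith stripped "- " then
    let entry := PySem.Str.slice stripped (some 2) none
    let kv := pvEntryKV entry
    recs ++ [(kv.1, [PySem.Str.strip kv.2])]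
  else
    match recs.getLast? with
    | some r =>
      if r.1 ≠ "" ∧ stripped ≠ "" ∧
          PySem.Str.strIsspace (PySem.Str.slice raw_line none (some 1)) = true then
        recs.dropLast ++ [(r.1, r.2 ++ [stripped])]
      else recs
    | none => recs

-- "\n".join(p for p in pieces if p)
def pvJoinPieces (ps : List String) : String :=
  PySem.Str.join "\n" (ps.filter (fun p => p ≠ ""))

def parse_bullet_kv_section_alt (section_ : String) : List (String × String) :=
  (((PySem.Str.splitlines section_).foldl pvB_step []).foldl
    (fun d r => d.insert r.1 (pvJoinPieces r.2)) PySem.Dict.empty).items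

-- ===== PRECONDITION & SPEC =====
def Spec_parse_bullet_kv_section (section_ : String) (out : List (String × String)) : Prop := out = parse_bullet_kv_section_alt section_
instance (section_ : String) (out : List (String × String)) : Decidable (Spec_parse_bullet_kv_section section_ out) := by unfold Spec_parse_bullet_kv_section; infer_instance

-- ===== CLAIM (what is proved, stated in full; the proofs are below) =====
def Claim_equal_parse_bullet_kv_section : Prop := ∀ (section_ : String), Dom_parse_bullet_kv_section section_ → Spec_parse_bullet_kv_section section_ (parse_bullet_kv_section section_)

-- ===== LEMMAS AND PROOFS =====

-- B's pass 2, as a function (used to state the loop invariant)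
def pvBuild (recs : List (String × List String)) : PySem.Dict String String :=
  recs.foldl (fun d r => d.insert r.1 (pvJoinPieces r.2)) PySem.Dict.empty

def pvLastKey (recs : List (String × List String)) : Option String :=
  recs.getLast?.map (·.1)

-- invariant: the joined value of the active record is strip-fixed
def pvInv (recs : List (String × List String)) : Prop :=
  ∀ r, recs.getLast? = some r → PySem.Str.strip (pvJoinPieces r.2) = pvJoinPieces r.2

-- ---- string facts ----

theorem pv_dw_idem (p : Char → Bool) (l : List Char) :
    List.dropWhile p (List.dropWhile p l) = List.dropWhile p l := by
  induction l with
  | nil => simp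
  | cons a t ih => by_cases h : p a <;> simp [h, ih]

theorem pv_rstrip_cons (a : Char) (t : List Char) :
    PySem.Chars.rstrip (a :: t) =
      if (PySem.Chars.rstrip t).isEmpty then (if PySem.Chars.isspace a then [] else [a])
      else a :: PySem.Chars.rstrip t := by
  simp only [PySem.Chars.rstrip, List.reverse_cons, List.dropWhile_append]
  by_cases h : (List.dropWhile PySem.Chars.isspace t.reverse).isEmpty <;>
    by_cases ha : PySem.Chars.isspace a <;>
    simp [h, ha, List.dropWhile]

theorem pv_comm (s : List Char) :
    PySem.Chars.lstrip (PySem.Chars.rstrip s) = PySem.Chars.rstrip (PySem.Chars.lstrip s) := by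
  induction s with
  | nil => rfl
  | cons a t ih =>
    by_cases ha : PySem.Chars.isspace a
    · rw [pv_rstrip_cons]
      by_cases h : (PySem.Chars.rstrip t).isEmpty
      · have h' : PySem.Chars.rstrip t = [] := List.isEmpty_iff.mp h
        have hl : PySem.Chars.lstrip (a :: t) = PySem.Chars.lstrip t := by
          simp [PySem.Chars.lstrip, ha]
        rw [if_pos h, if_pos ha, hl, ← ih, h']
      · rw [if_neg (by simp [h])]
        have hl : PySem.Chars.lstrip (a :: t) = PySem.Chars.lstrip t := by
          simp [PySem.Chars.lstrip, ha]
        rw [hl, ← ih]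
        simp [PySem.Chars.lstrip, ha]
    · rw [pv_rstrip_cons]
      have hl : PySem.Chars.lstrip (a :: t) = a :: t := by
        simp [PySem.Chars.lstrip, ha]
      rw [hl, pv_rstrip_cons]
      by_cases h : (PySem.Chars.rstrip t).isEmpty
      · simp [h, ha, PySem.Chars.lstrip]
      · simp [h, ha, PySem.Chars.lstrip]

theorem pv_rstrip_idem (s : List Char) :
    PySem.Chars.rstrip (PySem.Chars.rstrip s) = PySem.Chars.rstrip s := by
  simp [PySem.Chars.rstrip, pv_dw_idem]

theorem pv_lstrip_idem (s : List Char) :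
    PySem.Chars.lstrip (PySem.Chars.lstrip s) = PySem.Chars.lstrip s := by
  simp [PySem.Chars.lstrip, pv_dw_idem]

theorem pv_strip_rstrip_c (s : List Char) :
    PySem.Chars.strip (PySem.Chars.rstrip s) = PySem.Chars.strip s := by
  simp only [PySem.Chars.strip, pv_comm, pv_rstrip_idem]

theorem pv_strip_idem_c (s : List Char) :
    PySem.Chars.strip (PySem.Chars.strip s) = PySem.Chars.strip s := by
  simp only [PySem.Chars.strip, pv_comm, pv_rstrip_idem, pv_lstrip_idem]

theorem pv_lstrip_suffix (s : List Char) : PySem.Chars.lstrip s <:+ s :=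
  List.dropWhile_suffix _

theorem pv_rstrip_len (s : List Char) : (PySem.Chars.rstrip s).length ≤ s.length := by
  simpa [PySem.Chars.rstrip] using (List.dropWhile_suffix (l := s.reverse) PySem.Chars.isspace).length_le

theorem pv_fixed_parts_c {s : List Char} (h : PySem.Chars.strip s = s) :
    PySem.Chars.lstrip s = s ∧ PySem.Chars.rstrip s = s := by
  have hls : (PySem.Chars.lstrip s).length ≤ s.length := (pv_lstrip_suffix s).length_le
  have hrl : (PySem.Chars.rstrip (PySem.Chars.lstrip s)).length ≤ (PySem.Chars.lstrip s).length :=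
    pv_rstrip_len _
  have hlen : (PySem.Chars.lstrip s).length = s.length := by
    have := congrArg List.length h
    simp only [PySem.Chars.strip] at this
    omega
  have hl : PySem.Chars.lstrip s = s := (pv_lstrip_suffix s).eq_of_length hlen
  refine ⟨hl, ?_⟩
  have := h
  simp only [PySem.Chars.strip, hl] at this
  exact this

theorem pv_dw_eq_self_of_rstrip {s : List Char} (h : PySem.Chars.rstrip s = s) :
    List.dropWhile PySem.Chars.isspace s.reverse = s.reverse := by
  have := congrArg List.reverse h
  simpa [PySem.Chars.rstrip] using this

theorem pv_strip_append_c (a s sep : List Char)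
    (hla : PySem.Chars.lstrip a = a) (hane : a ≠ [])
    (hrs : PySem.Chars.rstrip s = s) (hsne : s ≠ []) :
    PySem.Chars.strip (a ++ sep ++ s) = a ++ sep ++ s := by
  have h1 : PySem.Chars.lstrip (a ++ sep ++ s) = a ++ sep ++ s := by
    simp only [PySem.Chars.lstrip] at hla ⊢
    rw [List.append_assoc, List.dropWhile_append, hla]
    simp [List.isEmpty_iff, hane]
  have h2 : PySem.Chars.rstrip (a ++ sep ++ s) = a ++ sep ++ s := by
    simp only [PySem.Chars.rstrip, List.append_assoc, List.reverse_append, List.dropWhile_append,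
      pv_dw_eq_self_of_rstrip hrs]
    simp [List.isEmpty_iff, hsne]
  simp only [PySem.Chars.strip, h1, h2]

theorem pv_join_concat (l : List (List Char)) (hl : l ≠ []) (s sep : List Char) :
    PySem.Chars.join sep (l ++ [s]) = PySem.Chars.join sep l ++ sep ++ s := by
  induction l with
  | nil => exact absurd rfl hl
  | cons a t ih =>
    cases t with
    | nil => simp [PySem.Chars.join_cons_cons, PySem.Chars.join_singleton]
    | cons b r =>
      have e1 : (a :: (b :: r) ++ [s]) = a :: b :: (r ++ [s]) := rfl
      have e2 : (b :: (r ++ [s])) = (b :: r) ++ [s] := rfl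
      rw [e1, PySem.Chars.join_cons_cons, e2, ih (by simp), PySem.Chars.join_cons_cons]
      simp [List.append_assoc]

theorem pv_join_cons_ne_nil (a : List Char) (ha : a ≠ []) (rest : List (List Char)) (sep : List Char) :
    PySem.Chars.join sep (a :: rest) ≠ [] := by
  cases rest with
  | nil => simpa [PySem.Chars.join_singleton] using ha
  | cons b r => simp [PySem.Chars.join_cons_cons, ha]

theorem pv_toList_ne_nil {s : String} (h : s ≠ "") : s.toList ≠ [] := by
  intro hl
  exact h (String.toList_inj.mp (by simpa using hl))

theorem pv_strip_rstrip (s : String) :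
    PySem.Str.strip (PySem.Str.rstrip s) = PySem.Str.strip s := by
  apply String.toList_inj.mp
  simp [PySem.Str.toList_strip, PySem.Str.toList_rstrip, pv_strip_rstrip_c]

theorem pv_strip_idem (s : String) :
    PySem.Str.strip (PySem.Str.strip s) = PySem.Str.strip s := by
  apply String.toList_inj.mp
  simp [PySem.Str.toList_strip, pv_strip_idem_c]

theorem pv_join_singleton (p : String) : PySem.Str.join "\n" [p] = p := by
  apply String.toList_inj.mp
  simp [PySem.Str.toList_join, PySem.Chars.join_singleton]

theorem pv_join_nil : PySem.Str.join "\n" ([] : List String) = "" := by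
  apply String.toList_inj.mp
  simp [PySem.Str.toList_join, PySem.Chars.join_nil]

theorem pv_joinPieces_singleton (p : String) : pvJoinPieces [p] = p := by
  by_cases h : p = ""
  · subst h; simp [pvJoinPieces, pv_join_nil]
  · simp [pvJoinPieces, h, pv_join_singleton]

theorem pv_joinPieces_empty_iff (ps : List String) :
    pvJoinPieces ps = "" ↔ ps.filter (fun p => p ≠ "") = [] := by
  constructor
  · intro h
    cases hf : ps.filter (fun p => p ≠ "") with
    | nil => rfl
    | cons a rest =>
      exfalso
      have ha : a ≠ "" := by
        have := List.mem_filter.mp (hf ▸ (List.mem_cons_self : a ∈ a :: rest))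
        simpa using this.2
      have : (pvJoinPieces ps).toList ≠ [] := by
        simp only [pvJoinPieces, PySem.Str.toList_join, hf, List.map_cons]
        exact pv_join_cons_ne_nil _ (pv_toList_ne_nil ha) _ _
      exact this (by simp [h])
  · intro h
    apply String.toList_inj.mp
    simp only [pvJoinPieces, h, PySem.Str.toList_join, List.map_nil, PySem.Chars.join_nil]
    simp

theorem pv_fixed_parts {s : String} (h : PySem.Str.strip s = s) :
    PySem.Chars.lstrip s.toList = s.toList ∧ PySem.Chars.rstrip s.toList = s.toList := by
  apply pv_fixed_parts_c
  rw [← PySem.Str.toList_strip, h]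

theorem pv_cont_value (ps : List String) (s : String)
    (hfix : PySem.Str.strip (pvJoinPieces ps) = pvJoinPieces ps)
    (hs : PySem.Str.strip s = s) (hsne : s ≠ "") :
    PySem.Str.strip (PySem.Str.join "\n"
        (([pvJoinPieces ps, s]).filter (fun p => p ≠ ""))) = pvJoinPieces (ps ++ [s]) := by
  have hfilter : (ps ++ [s]).filter (fun p => p ≠ "") = ps.filter (fun p => p ≠ "") ++ [s] := by
    simp [List.filter_append, hsne]
  by_cases hv : pvJoinPieces ps = ""
  · have hfnil := (pv_joinPieces_empty_iff ps).mp hv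
    rw [hv]
    have hfl0 : (["", s] : List String).filter (fun p => p ≠ "") = [s] := by simp [hsne]
    rw [hfl0, pv_join_singleton, hs]
    apply String.toList_inj.mp
    have hfnil' : List.filter (fun p => !decide (p = "")) ps = [] := by simpa using hfnil
    simp [pvJoinPieces, PySem.Str.toList_join, List.filter_append, hfnil', hsne,
      PySem.Chars.join_singleton]
  · have hfne : ps.filter (fun p => p ≠ "") ≠ [] := by
      intro h0
      exact hv ((pv_joinPieces_empty_iff ps).mpr h0)
    have hfl : ([pvJoinPieces ps, s]).filter (fun p => p ≠ "") = [pvJoinPieces ps, s] := by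
      simp [hv, hsne]
    rw [hfl]
    apply String.toList_inj.mp
    have hjoin2 : (PySem.Str.join "\n" [pvJoinPieces ps, s]).toList
        = (pvJoinPieces ps).toList ++ "\n".toList ++ s.toList := by
      simp [PySem.Str.toList_join, PySem.Chars.join_cons_cons, PySem.Chars.join_singleton]
    rw [PySem.Str.toList_strip, hjoin2]
    rw [pv_strip_append_c _ _ _ (pv_fixed_parts hfix).1 (pv_toList_ne_nil hv)
      (pv_fixed_parts hs).2 (pv_toList_ne_nil hsne)]
    simp only [pvJoinPieces, PySem.Str.toList_join, hfilter, List.map_append, List.map_cons,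
      List.map_nil]
    rw [pv_join_concat _ (by simpa using hfne)]

-- ---- fold facts ----
theorem pv_build_concat (l : List (String × List String)) (r : String × List String) :
    pvBuild (l ++ [r]) = (pvBuild l).insert r.1 (pvJoinPieces r.2) := by
  simp [pvBuild, List.foldl_append]

set_option maxHeartbeats 1000000 in
theorem pv_step_agree (recs : List (String × List String)) (raw : String) (hinv : pvInv recs) :
    pvA_step (pvBuild recs, pvLastKey recs) raw
      = (pvBuild (pvB_step recs raw), pvLastKey (pvB_step recs raw))
    ∧ pvInv (pvB_step recs raw) := by
  have hstrip := pv_strip_rstrip raw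
  by_cases hb : PySem.Str.startswith (PySem.Str.strip raw) "- " = true
  · simp only [pvA_step, pvB_step, hstrip, hb, if_true]
    refine ⟨?_, ?_⟩
    · rw [pv_build_concat]
      simp [pvLastKey, pv_joinPieces_singleton]
    · intro r hr
      rw [List.getLast?_concat] at hr
      obtain rfl := (Option.some.inj hr).symm
      rw [pv_joinPieces_singleton]
      exact pv_strip_idem _
  · simp only [pvA_step, pvB_step, hstrip, hb, if_false, Bool.false_eq_true]
    cases hLast : recs.getLast? with
    | none =>
      simp only [pvLastKey, hLast, Option.map_none]
      exact ⟨trivial, hinv⟩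
    | some r =>
      have hlk : pvLastKey recs = some r.1 := by simp [pvLastKey, hLast]
      simp only [hlk]
      by_cases hg : (r.1 ≠ "" ∧ PySem.Str.strip raw ≠ "" ∧
          PySem.Str.strIsspace (PySem.Str.slice raw none (some 1)) = true)
      · obtain ⟨hk, hsne, hsp⟩ := hg
        rw [if_pos ⟨hk, hsne, hsp⟩, if_pos ⟨hk, hsne, hsp⟩]
        have hdec : recs = recs.dropLast ++ [r] := (List.dropLast_append_getLast? _ hLast).symm
        have hbuild : pvBuild recs = (pvBuild recs.dropLast).insert r.1 (pvJoinPieces r.2) := by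
          conv_lhs => rw [hdec]
          exact pv_build_concat _ _
        have hfix := hinv r hLast
        have hval := pv_cont_value r.2 (PySem.Str.strip raw) hfix (pv_strip_idem raw) hsne
        have hgetD : (pvBuild recs).getD r.1 "" = pvJoinPieces r.2 := by
          rw [hbuild]; exact PySem.Dict.getD_insert_self _ _ _ _
        refine ⟨?_, ?_⟩
        · rw [hgetD, hval]
          rw [pv_build_concat, hbuild, PySem.Dict.insert_insert_self]
          simp [pvLastKey]
        · intro r' hr'
          rw [List.getLast?_concat] at hr'
          obtain rfl := (Option.some.inj hr').symm
          rw [← hval]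
          exact pv_strip_idem _
      · rw [if_neg hg, if_neg hg]
        exact ⟨by rw [hlk], hinv⟩

theorem pv_fold_agree (lines : List String) (recs : List (String × List String))
    (hinv : pvInv recs) :
    lines.foldl pvA_step (pvBuild recs, pvLastKey recs)
      = (pvBuild (lines.foldl pvB_step recs), pvLastKey (lines.foldl pvB_step recs)) := by
  induction lines generalizing recs with
  | nil => rfl
  | cons raw rest ih =>
    obtain ⟨hstep, hinv'⟩ := pv_step_agree recs raw hinv
    rw [List.foldl_cons, List.foldl_cons, hstep]
    exact ih _ hinv'

-- ===== VERDICT (by name: the statement is the Claim_ definition above) =====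
theorem parse_bullet_kv_section_spec : Claim_equal_parse_bullet_kv_section := by
  intro section_ _
  unfold Spec_parse_bullet_kv_section parse_bullet_kv_section parse_bullet_kv_section_alt
  have h := pv_fold_agree (PySem.Str.splitlines section_) [] (by intro r hr; simp at hr)
  simp only [pvBuild, pvLastKey, List.foldl_nil, List.getLast?_nil, Option.map_none] at h
  rw [h]
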